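-- pv_equiv track=rewrite | github.com/InfiniteMalice/GEPA-Mindfulness-superalignment | src/mindful_trace_gepa/prompts/dual_path.py | _gather_context
-- ===== SOURCE A (Python) =====
-- def _gather_context(rec_text: str, start: int, end: int) -> str:
--     clause_start = max((rec_text.rfind(ch, 0, start) for ch in ".;!?"), default=-1)
--     if clause_start >= 0:
--         clause_start += 1
--     left_boundary = max(clause_start, start - 60)
--     left = max(0, left_boundary)
--     right = min(len(rec_text), end + 40)
--     return rec_text[left:right]
-- ===== SOURCE B (Python) =====
-- def _gather_context(rec_text: str, start: int, end: int) -> str: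
--     # One forward pass over the prefix keeps the last delimiter position,
--     # instead of four separate backward rfind scans.
--     clause_start = -1
--     i = 0
--     for ch in rec_text[:start]:
--         if ch in ".;!?":
--             clause_start = i
--         i += 1
--     if clause_start >= 0:
--         clause_start += 1
--     left_boundary = max(clause_start, start - 60)
--     left = max(0, left_boundary)
--     right = min(len(rec_text), end + 40)
--     return rec_text[left:right]
-- ===== Notes on version B (the rewrite author's own statement) =====
-- stated objective: alternative
-- what changed: Replaces the four backward rfind scans (one per delimiter) whose results are combined with max by a single forward pass over rec_text[:start] that keeps the index of the last delimiter seen; the boundary arithmetic and slicing stay the same.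
import Mathlib
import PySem

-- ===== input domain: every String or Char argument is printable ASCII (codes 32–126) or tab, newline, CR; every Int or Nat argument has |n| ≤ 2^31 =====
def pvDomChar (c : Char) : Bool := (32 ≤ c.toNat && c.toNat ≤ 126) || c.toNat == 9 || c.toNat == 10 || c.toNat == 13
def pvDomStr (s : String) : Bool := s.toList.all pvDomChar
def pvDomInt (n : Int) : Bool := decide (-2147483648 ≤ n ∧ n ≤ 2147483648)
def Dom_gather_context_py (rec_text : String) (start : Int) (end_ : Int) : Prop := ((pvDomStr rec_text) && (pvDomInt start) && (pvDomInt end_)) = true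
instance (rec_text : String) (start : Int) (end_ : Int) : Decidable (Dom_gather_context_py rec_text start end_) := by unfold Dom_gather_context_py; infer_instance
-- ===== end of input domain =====

-- B replaces A's four backward rfind scans (combined with max) by one forward pass
-- over the prefix keeping the last delimiter index; objective: alternative (same cost).


-- ===== PORT A =====
-- hand port of str.rfind(c, 0, start): a right-to-left scan of the search region
-- rec_text[0:start]; since the region starts at 0, an index in it is an index in rec_text.
def pvRFindIn (l : List Char) (c : Char) : Int :=
  match l.reverse.findIdx? (fun x => x = c) with
  | some j => (l.length : Int) - 1 - (j : Int)
  | none => -1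

def gather_context_py (rec_text : String) (start : Int) (end_ : Int) : String :=
  let chars := rec_text.toList
  let pre := PySem.List.slice chars (some 0) (some start)
  -- the generator over ".;!?" is never empty, so the default=-1 is unreachable;
  -- Python's max over it is the left-nested binary max in this order
  let clause_start0 := max (max (max (pvRFindIn pre '.') (pvRFindIn pre ';')) (pvRFindIn pre '!')) (pvRFindIn pre '?')
  let clause_start := if clause_start0 ≥ 0 then clause_start0 + 1 else clause_start0
  let left_boundary := max clause_start (start - 60)
  let left := max 0 left_boundary
  let right := min (chars.length : Int) (end_ + 40)
  String.ofList (PySem.List.slice chars (some left) (some right))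

-- ===== PORT B =====
-- the forward loop of Source B: i counts positions, best keeps the last delimiter index
def pvLastDelimAux : List Char → Int → Int → Int
  | [], _, best => best
  | c :: rest, i, best =>
      pvLastDelimAux rest (i + 1) (if c ∈ ['.', ';', '!', '?'] then i else best)

def gather_context_py_alt (rec_text : String) (start : Int) (end_ : Int) : String :=
  let chars := rec_text.toList
  let pre := PySem.List.slice chars (some 0) (some start)
  let clause_start0 := pvLastDelimAux pre 0 (-1)
  let clause_start := if clause_start0 ≥ 0 then clause_start0 + 1 else clause_start0
  let left_boundary := max clause_start (start - 60)
  let left := max 0 left_boundary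
  let right := min (chars.length : Int) (end_ + 40)
  String.ofList (PySem.List.slice chars (some left) (some right))

-- ===== PRECONDITION & SPEC =====
def Spec_gather_context_py (rec_text : String) (start : Int) (end_ : Int) (out : String) : Prop := out = gather_context_py_alt rec_text start end_
instance (rec_text : String) (start : Int) (end_ : Int) (out : String) : Decidable (Spec_gather_context_py rec_text start end_ out) := by unfold Spec_gather_context_py; infer_instance

-- ===== CLAIM (what is proved, stated in full; the proofs are below) =====
def Claim_equal_gather_context_py : Prop := ∀ (rec_text : String) (start : Int) (end_ : Int), Dom_gather_context_py rec_text start end_ → Spec_gather_context_py rec_text start end_ (gather_context_py rec_text start end_)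

-- ===== LEMMAS AND PROOFS =====

theorem pvRFindIn_snoc (l : List Char) (x c : Char) :
    pvRFindIn (l ++ [x]) c = if x = c then (l.length : Int) else pvRFindIn l c := by
  unfold pvRFindIn
  rw [List.reverse_append]
  simp only [List.reverse_singleton, List.singleton_append, List.findIdx?_cons]
  by_cases h : x = c
  · simp [h]
  · simp only [h, decide_false, if_false]
    cases hf : l.reverse.findIdx? (fun y => y = c)
    · simp
    · simp [List.length_append]; omega

theorem pvRFindIn_lt (l : List Char) (c : Char) : pvRFindIn l c < (l.length : Int) := by
  induction l using List.reverseRecOn with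
  | nil => simp [pvRFindIn]
  | append_singleton l x ih =>
      rw [pvRFindIn_snoc]
      simp only [List.length_append, List.length_singleton]
      split
      · push_cast; omega
      · push_cast; omega

theorem pvLastDelimAux_snoc (x : Char) (l : List Char) :
    ∀ (i best : Int), pvLastDelimAux (l ++ [x]) i best =
      if x ∈ ['.', ';', '!', '?'] then i + (l.length : Int) else pvLastDelimAux l i best := by
  induction l with
  | nil => intro i best; simp [pvLastDelimAux]
  | cons c l ih =>
      intro i best
      simp only [List.cons_append, pvLastDelimAux, ih, List.length_cons]
      split
      · push_cast; ring_nf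
      · rfl

theorem lastDelim_eq_max (l : List Char) :
    pvLastDelimAux l 0 (-1) =
      max (max (max (pvRFindIn l '.') (pvRFindIn l ';')) (pvRFindIn l '!')) (pvRFindIn l '?') := by
  induction l using List.reverseRecOn with
  | nil => simp [pvLastDelimAux, pvRFindIn]
  | append_singleton l x ih =>
      rw [pvLastDelimAux_snoc, pvRFindIn_snoc, pvRFindIn_snoc, pvRFindIn_snoc, pvRFindIn_snoc]
      have h1 := pvRFindIn_lt l '.'
      have h2 := pvRFindIn_lt l ';'
      have h3 := pvRFindIn_lt l '!'
      have h4 := pvRFindIn_lt l '?'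
      by_cases hd : x = '.'
      · simp only [hd]; simp <;> omega
      · by_cases hs : x = ';'
        · simp only [hs]; simp <;> omega
        · by_cases he : x = '!'
          · simp only [he]; simp <;> omega
          · by_cases hq : x = '?'
            · simp only [hq]; simp <;> omega
            · have : x ∉ ['.', ';', '!', '?'] := by simp [hd, hs, he, hq]
              simp [this, hd, hs, he, hq, ih]

-- ===== VERDICT (by name: the statement is the Claim_ definition above) =====
theorem gather_context_py_spec : Claim_equal_gather_context_py := by
  intro rec_text start end_ _
  unfold Spec_gather_context_py gather_context_py gather_context_py_alt
  simp only [lastDelim_eq_max]
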